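-- pv_equiv track=rewrite | github.com/KingzZovo/F1-PHOTO | tools/eval_distribution.py | _bucket_count
-- ===== SOURCE A (Python) =====
-- from typing import Any, Dict, List, Optional, Tuple
--
-- def _bucket_count(values: List[int], thresholds: List[int], labels: List[str]) -> Dict[str, int]:
--     """Bucket a list of integer counts into named buckets.
--
--     `thresholds` is a list of upper-bounds per bucket label, except the last
--     label which captures `>= last_threshold`.
--     e.g. _bucket_count([0,1,1,2,3,5], [0,1,2], ['0','1','2','3+'])
--          -> {'0': 1, '1': 2, '2': 1, '3+': 2}
--     """
--     out = {label: 0 for label in labels}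
--     for v in values:
--         placed = False
--         for i, t in enumerate(thresholds):
--             if v == t:
--                 out[labels[i]] += 1
--                 placed = True
--                 break
--         if not placed:
--             # Falls into final "N+" bucket
--             out[labels[-1]] += 1
--     return out
-- ===== SOURCE B (Python) =====
-- from typing import Dict, List
--
--
-- def _bucket_count(values: List[int], thresholds: List[int], labels: List[str]) -> Dict[str, int]:
--     # Aggregate first, then distribute: one dict of multiplicities, one
--     # threshold->index map (first occurrence wins, matching break semantics),
--     # then a single pass over the DISTINCT values.
--     counts = {}
--     for v in values:
--         counts[v] = counts.get(v, 0) + 1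
--     tidx = {}
--     for i, t in enumerate(thresholds):
--         tidx.setdefault(t, i)
--     out = {label: 0 for label in labels}
--     for v, c in counts.items():
--         label = labels[tidx[v]] if v in tidx else labels[-1]
--         out[label] += c
--     return out
-- ===== Notes on version B (the rewrite author's own statement) =====
-- stated objective: faster
-- what changed: B aggregates values into a multiplicity dict and builds a first-occurrence threshold->index map once, then distributes each distinct value's count in a single pass over the distinct values, instead of A's per-element inner scan over thresholds with break.
import Mathlib
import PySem

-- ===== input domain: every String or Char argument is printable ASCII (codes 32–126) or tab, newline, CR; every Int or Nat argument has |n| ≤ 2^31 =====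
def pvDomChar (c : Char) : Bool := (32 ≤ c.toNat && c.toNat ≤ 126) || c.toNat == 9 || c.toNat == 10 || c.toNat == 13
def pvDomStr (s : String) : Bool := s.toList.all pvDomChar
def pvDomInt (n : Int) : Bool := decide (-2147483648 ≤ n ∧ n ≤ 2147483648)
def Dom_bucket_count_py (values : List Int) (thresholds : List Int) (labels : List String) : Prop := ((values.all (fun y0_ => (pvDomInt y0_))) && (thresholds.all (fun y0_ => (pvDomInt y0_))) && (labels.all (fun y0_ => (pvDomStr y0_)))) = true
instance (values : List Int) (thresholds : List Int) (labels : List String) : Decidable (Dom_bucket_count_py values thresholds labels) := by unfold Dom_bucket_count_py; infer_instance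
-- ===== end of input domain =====

-- B replaces A's per-element inner scan over thresholds by aggregate-then-distribute:
-- a multiplicity dict and a first-occurrence threshold->index map built once, then one
-- pass over the distinct values (alternative decomposition; return value only).

-- ===== PORT A =====
-- inner 'for i, t in enumerate(thresholds): if v == t: out[labels[i]] += 1; placed = True; break'
def pvA_inner (labels : List String) (v : Int) (out : PySem.Dict String Int) :
    List (Int × Int) → PySem.Dict String Int × Bool
  | [] => (out, false)
  | (i, t) :: rest =>
    if v = t then (out.modify (PySem.List.pyGetD labels i "") 0 (· + 1), true)
    else pvA_inner labels v out rest

def bucket_count_py (values : List Int) (thresholds : List Int) (labels : List String) :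
    List (String × Int) :=
  let out0 := labels.foldl (fun d l => d.insert l 0) (PySem.Dict.empty : PySem.Dict String Int)
  (values.foldl (fun out v =>
      let r := pvA_inner labels v out (PySem.List.enumerate thresholds 0)
      if r.2 then r.1 else r.1.modify (PySem.List.pyGetD labels (-1) "") 0 (· + 1)) out0).items

-- ===== PORT B =====
def bucket_count_py_alt (values : List Int) (thresholds : List Int) (labels : List String) :
    List (String × Int) :=
  let counts := values.foldl (fun d v => d.insert v (d.getD v 0 + 1))
      (PySem.Dict.empty : PySem.Dict Int Int)
  let tidx := (PySem.List.enumerate thresholds 0).foldl (fun d p => d.setdefault p.2 p.1)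
      (PySem.Dict.empty : PySem.Dict Int Int)
  let out0 := labels.foldl (fun d l => d.insert l 0) (PySem.Dict.empty : PySem.Dict String Int)
  (counts.items.foldl (fun out p =>
      let label := if tidx.contains p.1 then PySem.List.pyGetD labels (tidx.getD p.1 0) ""
                   else PySem.List.pyGetD labels (-1) ""
      out.modify label 0 (· + p.2)) out0).items

-- ===== PRECONDITION & SPEC =====
-- Pre_ excludes exactly the inputs where Python A raises IndexError: a value matching a
-- threshold whose (first) index is beyond labels, or an unmatched value with labels empty.
def Pre_bucket_count_py (values : List Int) (thresholds : List Int) (labels : List String) : Prop :=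
  ∀ v ∈ values, (v ∈ thresholds → thresholds.idxOf v < labels.length) ∧
                (v ∉ thresholds → labels ≠ [])

instance (values : List Int) (thresholds : List Int) (labels : List String) :
    Decidable (Pre_bucket_count_py values thresholds labels) := by
  unfold Pre_bucket_count_py; infer_instance

def pvWitness_bucket_count_py : List Int × List Int × List String :=
  ([0, 1, 1, 2, 3, 5], [0, 1, 2], ["0", "1", "2", "3+"])

def Spec_bucket_count_py (values : List Int) (thresholds : List Int) (labels : List String) (out : List (String × Int)) : Prop := out = bucket_count_py_alt values thresholds labels
instance (values : List Int) (thresholds : List Int) (labels : List String) (out : List (String × Int)) : Decidable (Spec_bucket_count_py values thresholds labels out) := by unfold Spec_bucket_count_py; infer_instance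

-- ===== CLAIM (what is proved, stated in full; the proofs are below) =====
def Claim_equal_bucket_count_py : Prop := ∀ (values : List Int) (thresholds : List Int) (labels : List String), Dom_bucket_count_py values thresholds labels → Pre_bucket_count_py values thresholds labels → Spec_bucket_count_py values thresholds labels (bucket_count_py values thresholds labels)

-- ===== LEMMAS AND PROOFS =====

-- the label a value is classified to: first matching threshold's label, else the last label
def pvClassify (thresholds : List Int) (labels : List String) (v : Int) : String :=
  if v ∈ thresholds then PySem.List.pyGetD labels ((thresholds.idxOf v : Nat) : Int) ""
  else PySem.List.pyGetD labels (-1) ""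

theorem pvA_inner_eq (labels : List String) (v : Int) (out : PySem.Dict String Int) :
    ∀ (ts : List Int) (s : Int),
      pvA_inner labels v out (PySem.List.enumerate ts s) =
        if v ∈ ts then
          (out.modify (PySem.List.pyGetD labels (s + (ts.idxOf v : Nat)) "") 0 (· + 1), true)
        else (out, false) := by
  intro ts
  induction ts with
  | nil => intro s; simp [pvA_inner, PySem.List.enumerate_nil]
  | cons t rest ih =>
    intro s
    rw [PySem.List.enumerate_cons]
    by_cases h : v = t
    · subst h
      simp [pvA_inner, List.idxOf_cons_self]
    · have hbeq : (t == v) = false := by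
        rw [beq_eq_false_iff_ne]; exact fun e => h e.symm
      simp only [pvA_inner, ih (s + 1), List.mem_cons, h, false_or]
      by_cases hm : v ∈ rest
      · simp only [if_pos hm]
        have hidx : (t :: rest).idxOf v = rest.idxOf v + 1 := by
          simp [List.idxOf_cons, hbeq]
        have harg : s + 1 + ((rest.idxOf v : Nat) : Int) = s + (((rest.idxOf v + 1 : Nat)) : Int) := by
          push_cast; ring
        rw [hidx, harg]
        simp
      · simp [hm]

theorem pvTidx_contains (v : Int) :
    ∀ (ts : List Int) (s : Int) (d : PySem.Dict Int Int),
      ((PySem.List.enumerate ts s).foldl (fun d p => d.setdefault p.2 p.1) d).contains v =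
        (d.contains v || decide (v ∈ ts)) := by
  intro ts
  induction ts with
  | nil => intro s d; simp [PySem.List.enumerate_nil]
  | cons t rest ih =>
    intro s d
    rw [PySem.List.enumerate_cons]
    simp only [List.foldl_cons, ih (s + 1)]
    by_cases h : v = t
    · subst h
      simp [PySem.Dict.contains_setdefault]
    · have hbeq : (v == t) = false := by rw [beq_eq_false_iff_ne]; exact h
      rw [PySem.Dict.contains_setdefault]
      simp [hbeq, h]

theorem pvTidx_getD (v : Int) :
    ∀ (ts : List Int) (s : Int) (d : PySem.Dict Int Int),
      ((PySem.List.enumerate ts s).foldl (fun d p => d.setdefault p.2 p.1) d).getD v 0 =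
        if d.contains v then d.getD v 0
        else if v ∈ ts then s + (ts.idxOf v : Nat) else 0 := by
  intro ts
  induction ts with
  | nil =>
    intro s d
    simp only [PySem.List.enumerate_nil, List.foldl_nil, List.not_mem_nil, if_false]
    by_cases hc : d.contains v = true
    · rw [if_pos hc]
    · rw [if_neg hc]
      exact PySem.Dict.getD_of_not_contains d 0 (by simpa using hc)
  | cons t rest ih =>
    intro s d
    rw [PySem.List.enumerate_cons]
    simp only [List.foldl_cons, ih (s + 1)]
    by_cases h : v = t
    · subst h
      have hc' : (d.setdefault v s).contains v = true := by
        simp [PySem.Dict.contains_setdefault]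
      rw [if_pos hc', PySem.Dict.getD_setdefault_self]
      by_cases hc : d.contains v = true
      · rw [if_pos hc]
        obtain ⟨w, hw⟩ := Option.isSome_iff_exists.mp
          (show (d.get? v).isSome = true by
            rw [← PySem.Dict.contains_eq_isSome_get?]; exact hc)
        rw [PySem.Dict.getD_of_get?_eq_some d s hw, PySem.Dict.getD_of_get?_eq_some d 0 hw]
      · rw [if_neg hc, if_pos (show v ∈ v :: rest by simp)]
        rw [PySem.Dict.getD_of_not_contains d s (by simpa using hc)]
        simp [List.idxOf_cons_self]
    · have hbeq : (v == t) = false := by rw [beq_eq_false_iff_ne]; exact h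
      have hbeq' : (t == v) = false := by
        rw [beq_eq_false_iff_ne]; exact fun e => h e.symm
      have hc' : (d.setdefault t s).contains v = d.contains v := by
        rw [PySem.Dict.contains_setdefault]; simp [hbeq]
      rw [hc']
      by_cases hc : d.contains v = true
      · rw [if_pos hc, if_pos hc]
        rw [PySem.Dict.getD_eq_get?_getD, PySem.Dict.get?_setdefault_of_ne d s h,
          ← PySem.Dict.getD_eq_get?_getD]
      · rw [if_neg hc, if_neg hc]
        simp only [List.mem_cons, h, false_or]
        by_cases hm : v ∈ rest
        · rw [if_pos hm, if_pos hm]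
          have hidx : (t :: rest).idxOf v = rest.idxOf v + 1 := by
            simp [List.idxOf_cons, hbeq']
          rw [hidx]; push_cast; ring
        · simp [hm]

theorem pvSet_update_subset {α : Type} [BEq α] [LawfulBEq α] :
    ∀ (l : List α) (s : PySem.Set α), (∀ x ∈ l, x ∈ s) → PySem.Set.update s l = s := by
  intro l
  induction l with
  | nil => intro s _; rfl
  | cons x rest ih =>
    intro s h
    have hx : PySem.Set.add s x = s := by
      simp [PySem.Set.add, PySem.Set.contains, h x (by simp)]
    calc PySem.Set.update s (x :: rest) = PySem.Set.update (PySem.Set.add s x) rest := rfl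
      _ = PySem.Set.update s rest := by rw [hx]
      _ = s := ih s (fun y hy => h y (by simp [hy]))

theorem pvGetD_fold_pairs (th : List Int) (labs : List String) (k : String) :
    ∀ (l : List (Int × Int)) (d : PySem.Dict String Int),
      (l.foldl (fun d p => d.modify (pvClassify th labs p.1) 0 (· + p.2)) d).getD k 0 =
        d.getD k 0 + ((l.filter (fun p => pvClassify th labs p.1 == k)).map (·.2)).sum := by
  intro l
  induction l with
  | nil => intro d; simp
  | cons p rest ih =>
    intro d
    simp only [List.foldl_cons, ih, List.filter_cons]
    by_cases h : pvClassify th labs p.1 = k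
    · rw [PySem.Dict.getD_modify, if_pos h.symm]
      simp [h]
      ring
    · rw [PySem.Dict.getD_modify, if_neg (fun e => h e.symm)]
      simp [h]

-- distributing counts over the distinct values matches counting the classified list
theorem pvSum_count (g : Int → String) (k : String) (s : List Int) (hnd : s.Nodup) :
    ∀ (xs : List Int), (∀ x ∈ xs, x ∈ s) →
      (((s.filter (fun v => g v == k)).map (fun v => (List.count v xs : Int))).sum
        = (List.count k (xs.map g) : Int)) := by
  intro xs
  induction xs with
  | nil => intro _; simp
  | cons x t ih =>
    intro h
    have hx : x ∈ s := h x (by simp)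
    have ht : ∀ y ∈ t, y ∈ s := fun y hy => h y (by simp [hy])
    have hcnt : (fun v : Int => (List.count v (x :: t) : Int)) =
        fun v => (List.count v t : Int) + (if v = x then (1 : Int) else 0) := by
      funext v
      rw [List.count_cons]
      by_cases hv : v = x
      · simp [hv]
      · simp [hv, Ne.symm hv]
    have hone : ((s.filter (fun v => g v == k)).map
        (fun v => if v = x then (1 : Int) else 0)).sum = if g x = k then 1 else 0 := by
      have h1 : (fun v : Int => if v = x then (1 : Int) else 0) =
          fun v => if ((· == x) v) = true then (1 : Int) else 0 := by
        funext v; by_cases hv : v = x <;> simp [hv]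
      rw [h1, PySem.List.sum_map_ite_one_zero]
      have hcount : List.countP (· == x) (s.filter (fun v => g v == k)) =
          List.count x (s.filter (fun v => g v == k)) := rfl
      rw [hcount]
      by_cases hgx : g x = k
      · have hmem : x ∈ s.filter (fun v => g v == k) :=
          List.mem_filter.mpr ⟨hx, by simp [hgx]⟩
        rw [List.count_eq_one_of_mem (hnd.filter _) hmem]
        simp [hgx]
      · have hnm : x ∉ s.filter (fun v => g v == k) := by
          intro hmem
          exact hgx (by simpa using (List.mem_filter.mp hmem).2)
        rw [List.count_eq_zero_of_not_mem hnm]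
        simp [hgx]
    rw [hcnt, show ((s.filter (fun v => g v == k)).map
          (fun v => (List.count v t : Int) + (if v = x then (1 : Int) else 0))) =
        ((s.filter (fun v => g v == k)).map
          (fun v => (fun v => (List.count v t : Int)) v + (fun v => if v = x then (1 : Int) else 0) v)) from rfl,
      PySem.List.sum_map_add_int, ih ht, hone]
    rw [List.map_cons, List.count_cons]
    by_cases hgx : g x = k <;> simp [hgx]

theorem bucket_count_py_spec : Claim_equal_bucket_count_py := by
  intro values thresholds labels _hdom hpre
  unfold Spec_bucket_count_py bucket_count_py bucket_count_py_alt
  simp only []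
  -- A's per-element step IS 'modify at the classified label'
  have hstepA : (fun (out : PySem.Dict String Int) (v : Int) =>
      let r := pvA_inner labels v out (PySem.List.enumerate thresholds 0)
      if r.2 then r.1 else r.1.modify (PySem.List.pyGetD labels (-1) "") 0 (· + 1)) =
      fun out v => out.modify (pvClassify thresholds labels v) 0 (· + 1) := by
    funext out v
    simp only [pvA_inner_eq labels v out thresholds 0]
    by_cases hm : v ∈ thresholds
    · simp [hm, pvClassify]
    · simp [hm, pvClassify]
  rw [hstepA]
  -- B's per-pair label IS the classified label of the distinct value
  have hstepB : (fun (out : PySem.Dict String Int) (p : Int × Int) =>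
      let label := if ((PySem.List.enumerate thresholds 0).foldl
            (fun d p => d.setdefault p.2 p.1) (PySem.Dict.empty : PySem.Dict Int Int)).contains p.1
          then PySem.List.pyGetD labels
            (((PySem.List.enumerate thresholds 0).foldl
              (fun d p => d.setdefault p.2 p.1) (PySem.Dict.empty : PySem.Dict Int Int)).getD p.1 0) ""
          else PySem.List.pyGetD labels (-1) ""
      out.modify label 0 (· + p.2)) =
      fun out p => out.modify (pvClassify thresholds labels p.1) 0 (· + p.2) := by
    funext out p
    simp only [pvTidx_contains, pvTidx_getD, PySem.Dict.contains_empty, pvClassify]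
    by_cases hm : p.1 ∈ thresholds
    · simp [hm]
    · simp [hm]
  rw [hstepB, PySem.Dict.foldl_insert_getD_add_one_eq_counter]
  -- shared initial dict
  have hkeys0 : (labels.foldl (fun d l => d.insert l 0)
      (PySem.Dict.empty : PySem.Dict String Int)).keys = PySem.Set.ofList labels := by
    rw [PySem.Dict.keys_foldl_insert]
    rfl
  have hnd0 : (labels.foldl (fun d l => d.insert l 0)
      (PySem.Dict.empty : PySem.Dict String Int)).keys.Nodup :=
    PySem.Dict.nodup_keys_foldl_insert _ _ _ (by simp)
  have hmemc : ∀ v ∈ values, pvClassify thresholds labels v ∈ labels := by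
    intro v hv
    obtain ⟨h1, h2⟩ := hpre v hv
    unfold pvClassify
    split_ifs with hm
    · apply PySem.List.pyGetD_mem
      have := h1 hm
      simp only [PySem.Raise.InRange]
      omega
    · rw [PySem.List.pyGetD_neg_one labels "" (h2 hm)]
      exact List.getLast_mem _
  -- keys of both results equal the initial keys
  have hkeysA : (values.foldl (fun out v => out.modify (pvClassify thresholds labels v) 0 (· + 1))
      (labels.foldl (fun d l => d.insert l 0) (PySem.Dict.empty : PySem.Dict String Int))).keys =
      (labels.foldl (fun d l => d.insert l 0) (PySem.Dict.empty : PySem.Dict String Int)).keys := by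
    have hsub : ∀ x ∈ List.map (pvClassify thresholds labels) values,
        x ∈ (labels.foldl (fun d l => d.insert l 0) (PySem.Dict.empty : PySem.Dict String Int)).keys := by
      intro x hx
      rw [hkeys0, PySem.Set.mem_ofList]
      obtain ⟨v, hv, rfl⟩ := List.mem_map.mp hx
      exact hmemc v hv
    rw [PySem.Dict.keys_foldl_modify_key values (pvClassify thresholds labels) 0 (fun _ _ => (· + 1)),
      ]
    exact pvSet_update_subset _ _ hsub
  have hkeysB : (((PySem.Dict.counter values).items).foldl
      (fun out p => out.modify (pvClassify thresholds labels p.1) 0 (· + p.2))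
      (labels.foldl (fun d l => d.insert l 0) (PySem.Dict.empty : PySem.Dict String Int))).keys =
      (labels.foldl (fun d l => d.insert l 0) (PySem.Dict.empty : PySem.Dict String Int)).keys := by
    have hsub : ∀ x ∈ List.map (fun p : Int × Int => pvClassify thresholds labels p.1)
        ((PySem.Dict.counter values).items),
        x ∈ (labels.foldl (fun d l => d.insert l 0) (PySem.Dict.empty : PySem.Dict String Int)).keys := by
      intro x hx
      rw [hkeys0, PySem.Set.mem_ofList]
      obtain ⟨p, hp, rfl⟩ := List.mem_map.mp hx
      rw [PySem.Dict.items_counter] at hp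
      obtain ⟨v, hv, rfl⟩ := List.mem_map.mp hp
      exact hmemc v ((PySem.Set.mem_ofList values v).mp hv)
    rw [PySem.Dict.keys_foldl_modify_key ((PySem.Dict.counter values).items)
      (fun p => pvClassify thresholds labels p.1) 0 (fun _ p => (· + p.2)),
      ]
    exact pvSet_update_subset _ _ hsub
  -- the stored count at every key agrees
  have hgetD : ∀ k : String,
      (values.foldl (fun out v => out.modify (pvClassify thresholds labels v) 0 (· + 1))
        (labels.foldl (fun d l => d.insert l 0) (PySem.Dict.empty : PySem.Dict String Int))).getD k 0 =
      (((PySem.Dict.counter values).items).foldl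
        (fun out p => out.modify (pvClassify thresholds labels p.1) 0 (· + p.2))
        (labels.foldl (fun d l => d.insert l 0) (PySem.Dict.empty : PySem.Dict String Int))).getD k 0 := by
    intro k
    have hA : (values.foldl (fun out v => out.modify (pvClassify thresholds labels v) 0 (· + 1))
        (labels.foldl (fun d l => d.insert l 0) (PySem.Dict.empty : PySem.Dict String Int))) =
        ((values.map (pvClassify thresholds labels)).foldl
          (fun d x => d.modify x 0 (· + 1)) (labels.foldl (fun d l => d.insert l 0) (PySem.Dict.empty : PySem.Dict String Int))) :=
      (List.foldl_map (f := pvClassify thresholds labels)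
        (g := fun (d : PySem.Dict String Int) x => d.modify x 0 (· + 1))
        (l := values) (init := labels.foldl (fun d l => d.insert l 0) (PySem.Dict.empty : PySem.Dict String Int))).symm
    rw [hA, PySem.Dict.getD_foldl_modify_add_one, pvGetD_fold_pairs]
    rw [PySem.Dict.items_counter]
    rw [List.filter_map, List.map_map]
    have hfc : (List.filter ((fun p => pvClassify thresholds labels p.1 == k) ∘
        fun v => (v, (List.count v values : Int))) (PySem.Set.ofList values)) =
        (PySem.Set.ofList values).filter (fun v => pvClassify thresholds labels v == k) := rfl
    rw [hfc]
    have hmm : ((fun p : Int × Int => p.2) ∘ fun v => (v, (List.count v values : Int))) =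
        fun v => (List.count v values : Int) := rfl
    rw [hmm, pvSum_count (pvClassify thresholds labels) k (PySem.Set.ofList values)
      (PySem.Set.nodup_ofList values) values (fun x hx => (PySem.Set.mem_ofList values x).mpr hx)]
  -- both dicts have Nodup keys; compare items pointwise
  have hndA := PySem.Dict.nodup_keys_foldl_modify_key values (pvClassify thresholds labels) 0
    (fun _ _ => (· + 1)) (labels.foldl (fun d l => d.insert l 0) (PySem.Dict.empty : PySem.Dict String Int)) hnd0
  have hndB := PySem.Dict.nodup_keys_foldl_modify_key ((PySem.Dict.counter values).items)
    (fun p => pvClassify thresholds labels p.1) 0 (fun _ p => (· + p.2))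
    (labels.foldl (fun d l => d.insert l 0) (PySem.Dict.empty : PySem.Dict String Int)) hnd0
  rw [PySem.Dict.items_eq_map_keys _ hndA 0, PySem.Dict.items_eq_map_keys _ hndB 0,
    hkeysA, hkeysB]
  apply List.map_congr_left
  intro k _
  rw [hgetD k]
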